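-- pv_equiv track=rewrite | github.com/maxanisimov/capability-retention-in-continual-rl | rl_project/experiments/poisoned_apple/aggregate_metrics_across_seeds.py | _parse_seed_tokens
-- ===== SOURCE A (Python) =====
-- def _parse_seed_tokens(seed_tokens: list[str] | None) -> list[int] | None:
--     if not seed_tokens:
--         return None
--
--     seeds: list[int] = []
--     seen: set[int] = set()
--     for token in seed_tokens:
--         for part in token.split(","):
--             text = part.strip()
--             if not text:
--                 continue
--             if "-" in text:
--                 left, right = text.split("-", maxsplit=1)
--                 start = int(left.strip())
--                 end = int(right.strip())
--                 step = 1 if end >= start else -1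
--                 for seed in range(start, end + step, step):
--                     if seed not in seen:
--                         seen.add(seed)
--                         seeds.append(seed)
--             else:
--                 seed = int(text)
--                 if seed not in seen:
--                     seen.add(seed)
--                     seeds.append(seed)
--     return seeds
-- ===== SOURCE B (Python) =====
-- def _parse_seed_tokens(seed_tokens: list[str] | None) -> list[int] | None:
--     if not seed_tokens:
--         return None
--     # pass 1: collect every comma-separated part
--     parts = [part for token in seed_tokens for part in token.split(",")]
--     # pass 2: expand each non-blank part into one flat list (no dedup)
--     flat: list[int] = []
--     for part in parts:
--         text = part.strip()
--         if not text:
--             continue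
--         if "-" in text:
--             left, right = text.split("-", maxsplit=1)
--             start = int(left.strip())
--             end = int(right.strip())
--             if end >= start:
--                 flat += range(start, end + 1)
--             else:
--                 flat += list(range(end, start + 1))[::-1]
--         else:
--             flat.append(int(text))
--     # pass 3: keep an occurrence iff it does not appear earlier in flat
--     return [x for i, x in enumerate(flat) if x not in flat[:i]]
-- ===== Notes on version B (the rewrite author's own statement) =====
-- stated objective: alternative
-- what changed: A interleaves parsing with online dedup via a mutable seen-set inside triple-nested loops; B is three staged passes with no set at all: collect comma-parts, expand each part into one flat list (descending ranges built as a reversed ascending range), then keep each occurrence iff it is absent from its own prefix (quadratic membership scan).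
import Mathlib
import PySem

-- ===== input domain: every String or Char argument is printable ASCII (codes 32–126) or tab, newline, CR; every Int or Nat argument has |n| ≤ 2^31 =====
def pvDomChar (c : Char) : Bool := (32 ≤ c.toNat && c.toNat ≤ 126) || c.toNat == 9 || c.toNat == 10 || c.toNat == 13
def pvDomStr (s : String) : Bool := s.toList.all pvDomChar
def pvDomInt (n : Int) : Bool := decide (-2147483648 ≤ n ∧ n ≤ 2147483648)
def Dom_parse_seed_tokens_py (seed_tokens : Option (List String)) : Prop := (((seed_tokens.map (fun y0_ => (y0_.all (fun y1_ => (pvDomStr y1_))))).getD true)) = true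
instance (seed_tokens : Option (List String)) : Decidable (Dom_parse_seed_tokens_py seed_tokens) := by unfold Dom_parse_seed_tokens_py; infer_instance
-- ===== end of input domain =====

-- B drops A's online seen-set dedup inside nested loops for three staged passes with no set:
-- collect parts, expand into one flat list, then keep each occurrence iff absent from its prefix.

-- ===== PORT A =====
-- the 'if seed not in seen: seen.add(seed); seeds.append(seed)' body of A's two innermost branches
def pvASeed (st : List Int × PySem.Set Int) (seed : Int) : List Int × PySem.Set Int :=
  if ¬ PySem.Set.contains st.2 seed then (st.1 ++ [seed], PySem.Set.add st.2 seed) else st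

-- body of A's 'for part in token.split(",")' loop
def pvAPart (st : List Int × PySem.Set Int) (part : String) : List Int × PySem.Set Int :=
  let text := PySem.Str.strip part
  if text = "" then st
  else if PySem.Str.isIn "-" text then
    match PySem.Str.splitMax? text "-" 1 with
    | some (left :: right :: _) =>
      match PySem.Int.ofStr? (PySem.Str.strip left), PySem.Int.ofStr? (PySem.Str.strip right) with
      | some start, some «end» =>
        let step : Int := if «end» ≥ start then 1 else -1
        (PySem.List.pyRange start («end» + step) step).foldl pvASeed st
      | _, _ => st  -- int() raises ValueError here: excluded by Pre_
    | _ => st       -- unreachable: "-" ∈ text guarantees a 2-way split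
  else
    match PySem.Int.ofStr? text with
    | some seed => pvASeed st seed
    | none => st    -- int() raises ValueError here: excluded by Pre_

def parse_seed_tokens_py (seed_tokens : Option (List String)) : Option (List Int) :=
  match seed_tokens with
  | none => none
  | some tokens =>
    if tokens = [] then none   -- 'if not seed_tokens'
    else
      let st := tokens.foldl (fun st token => ((PySem.Str.split? token ",").getD []).foldl pvAPart st)
                  (([], []) : List Int × PySem.Set Int)
      some st.1

-- ===== PORT B =====
-- body of B's 'for part in parts' loop: extend flat with this part's ints
def pvBExpand (flat : List Int) (part : String) : List Int :=
  let text := PySem.Str.strip part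
  if text = "" then flat
  else if PySem.Str.isIn "-" text then
    match PySem.Str.splitMax? text "-" 1 with
    | some (left :: right :: _) =>
      match PySem.Int.ofStr? (PySem.Str.strip left), PySem.Int.ofStr? (PySem.Str.strip right) with
      | some start, some «end» =>
        if «end» ≥ start then flat ++ PySem.List.pyRange start («end» + 1) 1
        else flat ++ (PySem.List.pyRange «end» (start + 1) 1).reverse  -- list(range(end, start+1))[::-1]; [::-1] is reverse (slice?_none_none_neg_one)
      | _, _ => flat  -- int() raises ValueError here: excluded by Pre_
    | _ => flat
  else
    match PySem.Int.ofStr? text with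
    | some seed => flat ++ [seed]
    | none => flat  -- int() raises ValueError here: excluded by Pre_

def parse_seed_tokens_py_alt (seed_tokens : Option (List String)) : Option (List Int) :=
  match seed_tokens with
  | none => none
  | some tokens =>
    if tokens = [] then none
    else
      let parts := tokens.flatMap (fun token => (PySem.Str.split? token ",").getD [])
      let flat := parts.foldl pvBExpand []
      -- [x for i, x in enumerate(flat) if x not in flat[:i]]
      some (((PySem.List.enumerate flat 0).filter
              (fun p => decide (p.2 ∉ PySem.List.slice flat none (some p.1)))).map (·.2))

-- ===== PRECONDITION & SPEC =====
-- one comma-separated part parses iff it is blank, a '-'-free int literal, or both halves of its first '-' split are int literals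
def pvPartOk (part : String) : Bool :=
  let text := PySem.Str.strip part
  if text = "" then true
  else if PySem.Str.isIn "-" text then
    match PySem.Str.splitMax? text "-" 1 with
    | some (left :: right :: _) =>
      (PySem.Int.ofStr? (PySem.Str.strip left)).isSome && (PySem.Int.ofStr? (PySem.Str.strip right)).isSome
    | _ => false
  else (PySem.Int.ofStr? text).isSome

-- Pre_ excludes exactly the inputs on which A raises ValueError from int() (malformed parts, e.g. 'a' or a bare '-5'); A returns on everything else
def Pre_parse_seed_tokens_py (seed_tokens : Option (List String)) : Prop :=
  ((seed_tokens.getD []).all (fun t => ((PySem.Str.split? t ",").getD []).all pvPartOk)) = true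
instance (seed_tokens : Option (List String)) : Decidable (Pre_parse_seed_tokens_py seed_tokens) := by unfold Pre_parse_seed_tokens_py; infer_instance

def pvWitness_parse_seed_tokens_py : Option (List String) := some ["1-3, 7", " 2 ,9-7"]

def Spec_parse_seed_tokens_py (seed_tokens : Option (List String)) (out : Option (List Int)) : Prop := out = parse_seed_tokens_py_alt seed_tokens
instance (seed_tokens : Option (List String)) (out : Option (List Int)) : Decidable (Spec_parse_seed_tokens_py seed_tokens out) := by unfold Spec_parse_seed_tokens_py; infer_instance

-- ===== CLAIM (what is proved, stated in full; the proofs are below) =====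
def Claim_equal_parse_seed_tokens_py : Prop := ∀ (seed_tokens : Option (List String)), Dom_parse_seed_tokens_py seed_tokens → Pre_parse_seed_tokens_py seed_tokens → Spec_parse_seed_tokens_py seed_tokens (parse_seed_tokens_py seed_tokens)

-- ===== LEMMAS AND PROOFS =====

-- the flat list one part contributes (proof-only abbreviation, A's range formulation)
def pvPartInts (part : String) : List Int :=
  let text := PySem.Str.strip part
  if text = "" then []
  else if PySem.Str.isIn "-" text then
    match PySem.Str.splitMax? text "-" 1 with
    | some (left :: right :: _) =>
      match PySem.Int.ofStr? (PySem.Str.strip left), PySem.Int.ofStr? (PySem.Str.strip right) with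
      | some start, some «end» =>
        let step : Int := if «end» ≥ start then 1 else -1
        PySem.List.pyRange start («end» + step) step
      | _, _ => []
    | _ => []
  else
    match PySem.Int.ofStr? text with
    | some seed => [seed]
    | none => []

-- A's 'if seed not in seen' body from a synchronised state (s, s) is Set.add on both components
theorem pvASeed_add (s : List Int) (x : Int) :
    pvASeed (s, s) x = (PySem.Set.add s x, PySem.Set.add s x) := by
  simp only [pvASeed, PySem.Set.add, PySem.Set.contains]
  split_ifs with h <;> simp_all

theorem pvASeed_foldl (xs : List Int) (s : List Int) :
    xs.foldl pvASeed (s, s) = (xs.foldl PySem.Set.add s, xs.foldl PySem.Set.add s) := by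
  induction xs generalizing s with
  | nil => rfl
  | cons x xs ih => rw [List.foldl_cons, List.foldl_cons, pvASeed_add, ih]

theorem pvAPart_eq (part : String) (s : List Int) :
    pvAPart (s, s) part =
      ((pvPartInts part).foldl PySem.Set.add s, (pvPartInts part).foldl PySem.Set.add s) := by
  unfold pvAPart pvPartInts
  generalize PySem.Str.strip part = t
  by_cases h1 : t = ""
  · rw [if_pos h1, if_pos h1]; rfl
  · rw [if_neg h1, if_neg h1]
    by_cases h2 : PySem.Str.isIn "-" t = true
    · rw [if_pos h2, if_pos h2]
      cases hs : PySem.Str.splitMax? t "-" 1 with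
      | none => rfl
      | some l =>
        match l with
        | [] => rfl
        | [_] => rfl
        | left :: right :: rest =>
          cases ha : PySem.Int.ofStr? (PySem.Str.strip left) <;>
            cases hb : PySem.Int.ofStr? (PySem.Str.strip right) <;>
            simp only [ha, hb, pvASeed_foldl, List.foldl_nil]
    · rw [if_neg h2, if_neg h2]
      cases PySem.Int.ofStr? t <;>
        simp only [List.foldl_cons, List.foldl_nil, pvASeed_add]

-- whole nested loop of A: fold over a part list = fold Set.add over the flat expansion
theorem pvParts_eq (ps : List String) (s : List Int) :
    ps.foldl pvAPart (s, s) =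
      ((ps.flatMap pvPartInts).foldl PySem.Set.add s, (ps.flatMap pvPartInts).foldl PySem.Set.add s) := by
  induction ps generalizing s with
  | nil => rfl
  | cons p ps ihp => simp only [List.foldl_cons, List.flatMap_cons, List.foldl_append, pvAPart_eq, ihp]

theorem pvAFold_eq (tokens : List String) (s : List Int) :
    tokens.foldl (fun st token => ((PySem.Str.split? token ",").getD []).foldl pvAPart st) (s, s) =
      (let flat := tokens.flatMap (fun token => ((PySem.Str.split? token ",").getD []).flatMap pvPartInts);
       (flat.foldl PySem.Set.add s, flat.foldl PySem.Set.add s)) := by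
  induction tokens generalizing s with
  | nil => rfl
  | cons t ts ih => simp only [List.foldl_cons, List.flatMap_cons, List.foldl_append, pvParts_eq, ih]

-- B's expansion step appends exactly pvPartInts (descending ranges reversed: pyRange_neg_one_eq_reverse)
theorem pvBExpand_eq (flat : List Int) (part : String) :
    pvBExpand flat part = flat ++ pvPartInts part := by
  unfold pvBExpand pvPartInts
  generalize PySem.Str.strip part = t
  by_cases h1 : t = ""
  · simp [h1]
  · rw [if_neg h1, if_neg h1]
    by_cases h2 : PySem.Str.isIn "-" t = true
    · rw [if_pos h2, if_pos h2]
      cases hs : PySem.Str.splitMax? t "-" 1 with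
      | none => simp
      | some l =>
        match l with
        | [] => simp
        | [_] => simp
        | left :: right :: rest =>
          cases ha : PySem.Int.ofStr? (PySem.Str.strip left) with
          | none => simp [ha]
          | some start =>
            cases hb : PySem.Int.ofStr? (PySem.Str.strip right) with
            | none => simp [ha, hb]
            | some e =>
              simp only [ha, hb, ge_iff_le]
              by_cases h3 : start ≤ e
              · simp [h3]
              · simp only [if_neg h3]
                rw [show e + -1 = e - 1 by ring, PySem.List.pyRange_neg_one_eq_reverse,
                    show e - 1 + 1 = e by ring]
    · rw [if_neg h2, if_neg h2]
      cases PySem.Int.ofStr? t <;> simp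

theorem pvBFold_eq (ps : List String) (flat : List Int) :
    ps.foldl pvBExpand flat = flat ++ ps.flatMap pvPartInts := by
  induction ps generalizing flat with
  | nil => simp
  | cons p ps ih => simp [List.foldl_cons, pvBExpand_eq, ih]

-- prefix-membership comprehension = first-occurrence dedup (Set.ofList), by right-append induction
theorem pvFilter_dedup (xs : List Int) :
    ((PySem.List.enumerate xs 0).filter
        (fun p => decide (p.2 ∉ PySem.List.slice xs none (some p.1)))).map (·.2) =
      PySem.Set.ofList xs := by
  induction xs using List.reverseRecOn with
  | nil => rfl
  | append_singleton zs y ih =>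
    rw [PySem.List.enumerate_append]
    rw [List.filter_append, List.map_append]
    have hcong : ∀ p ∈ PySem.List.enumerate zs 0,
        (decide (p.2 ∉ PySem.List.slice (zs ++ [y]) none (some p.1)))
          = (decide (p.2 ∉ PySem.List.slice zs none (some p.1))) := by
      intro p hp
      obtain ⟨k, hk, rfl⟩ := (PySem.List.mem_enumerate_iff _ _ _).1 hp
      dsimp only
      rw [PySem.List.slice_to, PySem.List.slice_to]
      · have htoNat : ((0:Int) + (k:Int)).toNat = k := by omega
        rw [htoNat, List.take_append_of_le_length (le_of_lt hk)]
      · positivity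
      · positivity
    rw [List.filter_congr hcong, ih]
    have hself : (0 + (zs.length:Int)) = (zs.length:Int) := by ring
    simp only [PySem.List.enumerate, List.filter_cons, List.filter_nil]
    rw [PySem.Set.ofList_append_singleton]
    have hsl : PySem.List.slice (zs ++ [y]) none (some (0 + (zs.length:Int))) = zs := by
      rw [PySem.List.slice_to]
      · have : ((0:Int) + (zs.length:Int)).toNat = zs.length := by omega
        rw [this, List.take_left]
      · positivity
    by_cases hy : y ∈ zs
    · simp only [hsl, hy, not_true_eq_false, decide_false]
      simp [PySem.Set.add, PySem.Set.contains, hy]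
    · simp only [hsl, hy, not_false_eq_true, decide_true, if_true, List.map_cons, List.map_nil]
      simp [PySem.Set.add, PySem.Set.contains, hy]

-- ===== VERDICT (by name: the statement is the Claim_ definition above) =====
theorem parse_seed_tokens_py_spec : Claim_equal_parse_seed_tokens_py := by
  intro seed_tokens _ _
  unfold Spec_parse_seed_tokens_py parse_seed_tokens_py parse_seed_tokens_py_alt
  cases seed_tokens with
  | none => rfl
  | some tokens =>
    by_cases h : tokens = []
    · simp [h]
    · simp only [h, if_false]
      rw [pvAFold_eq, pvBFold_eq, List.nil_append, pvFilter_dedup]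
      rw [List.flatMap_assoc]
      rw [PySem.Set.ofList_eq_foldl]
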